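-- pv_equiv track=rewrite | github.com/aitor94/Hacker-rank-problems | practice/strings/StrongPassword.py | minimumNumber
-- ===== SOURCE A (Python) =====
-- numbers = "0123456789"
--
-- lower_case = "abcdefghijklmnopqrstuvwxyz"
--
-- upper_case = "ABCDEFGHIJKLMNOPQRSTUVWXYZ"
--
-- special_characters = "!@#$%^&*()-+"
--
-- def minimumNumber(n, password):
--     # Return the minimum number of characters to make the password strong
--     total = 0
--     if not(any(ext in password for ext in numbers)):
--         total += 1
--     if not(any(ext in password for ext in lower_case)):
--         total += 1
--     if not(any(ext in password for ext in upper_case)):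
--         total += 1
--     if not(any(ext in password for ext in special_characters)):
--         total += 1
--     if n + total < 6:
--         total += 6 - (n + total)
--     return total
-- ===== SOURCE B (Python) =====
-- def minimumNumber(n, password):
--     # One pass over password, maintaining four presence flags; then max with the length rule.
--     has_digit = has_lower = has_upper = has_special = False
--     for ch in password:
--         if ch in "0123456789":
--             has_digit = True
--         if ch in "abcdefghijklmnopqrstuvwxyz":
--             has_lower = True
--         if ch in "ABCDEFGHIJKLMNOPQRSTUVWXYZ":
--             has_upper = True
--         if ch in "!@#$%^&*()-+":
--             has_special = True
--     total = 4 - (has_digit + has_lower + has_upper + has_special)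
--     return max(total, 6 - n)
-- ===== Notes on version B (the rewrite author's own statement) =====
-- stated objective: simpler
-- what changed: Replaces A's four separate scans over the class alphabets (each testing membership of a class char in the whole password) and the conditional top-up arithmetic by a single pass over the password that sets four presence flags, then computes the answer as max(4 - #present, 6 - n).
import Mathlib
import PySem

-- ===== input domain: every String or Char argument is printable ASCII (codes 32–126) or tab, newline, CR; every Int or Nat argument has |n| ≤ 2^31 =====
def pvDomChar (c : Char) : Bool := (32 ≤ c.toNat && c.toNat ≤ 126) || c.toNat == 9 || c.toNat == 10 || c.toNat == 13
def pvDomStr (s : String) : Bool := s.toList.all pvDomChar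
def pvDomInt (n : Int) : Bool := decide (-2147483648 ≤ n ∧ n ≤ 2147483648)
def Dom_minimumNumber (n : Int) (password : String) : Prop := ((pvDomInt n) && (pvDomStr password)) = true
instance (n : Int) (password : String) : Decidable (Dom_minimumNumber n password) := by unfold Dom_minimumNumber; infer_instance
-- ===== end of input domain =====

-- B does one pass over the password maintaining four presence flags instead of A's four
-- scans over the class alphabets; the final length rule becomes a max.  Objective: simpler.

-- ===== PORT A =====
-- module constants
def pvNumbers : String := "0123456789"
def pvLowerCase : String := "abcdefghijklmnopqrstuvwxyz"
def pvUpperCase : String := "ABCDEFGHIJKLMNOPQRSTUVWXYZ"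
def pvSpecialCharacters : String := "!@#$%^&*()-+"

-- 'any(ext in password for ext in cls)': for single-character ext, 'ext in password'
-- is exactly character membership in password (exact on this input space).
def pvAnyIn (cls : String) (password : String) : Bool :=
  cls.toList.any (fun ext => password.toList.contains ext)

def minimumNumber (n : Int) (password : String) : Int :=
  let total : Int := 0
  let total := if !(pvAnyIn pvNumbers password) then total + 1 else total
  let total := if !(pvAnyIn pvLowerCase password) then total + 1 else total
  let total := if !(pvAnyIn pvUpperCase password) then total + 1 else total
  let total := if !(pvAnyIn pvSpecialCharacters password) then total + 1 else total
  if n + total < 6 then total + (6 - (n + total)) else total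

-- ===== PORT B =====
-- one step of B's loop: update the four presence flags for one password character
def pvStep (st : Bool × Bool × Bool × Bool) (ch : Char) : Bool × Bool × Bool × Bool :=
  let (d, l, u, s) := st
  let d := if pvNumbers.toList.contains ch then true else d
  let l := if pvLowerCase.toList.contains ch then true else l
  let u := if pvUpperCase.toList.contains ch then true else u
  let s := if pvSpecialCharacters.toList.contains ch then true else s
  (d, l, u, s)

def minimumNumber_alt (n : Int) (password : String) : Int :=
  let (d, l, u, s) := password.toList.foldl pvStep (false, false, false, false)
  let total : Int := 4 - ((if d then (1:Int) else 0) + (if l then 1 else 0)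
      + (if u then 1 else 0) + (if s then 1 else 0))
  max total (6 - n)

-- ===== PRECONDITION & SPEC =====
def Spec_minimumNumber (n : Int) (password : String) (out : Int) : Prop := out = minimumNumber_alt n password
instance (n : Int) (password : String) (out : Int) : Decidable (Spec_minimumNumber n password out) := by unfold Spec_minimumNumber; infer_instance

-- ===== CLAIM (what is proved, stated in full; the proofs are below) =====
def Claim_equal_minimumNumber : Prop := ∀ (n : Int) (password : String), Dom_minimumNumber n password → Spec_minimumNumber n password (minimumNumber n password)

-- ===== LEMMAS AND PROOFS =====

-- B's fold yields, in each component, 'some password char belongs to that class'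
theorem pvFoldl_step (xs : List Char) (d l u s : Bool) :
    xs.foldl pvStep (d, l, u, s) =
      (d || xs.any (fun c => pvNumbers.toList.contains c),
       l || xs.any (fun c => pvLowerCase.toList.contains c),
       u || xs.any (fun c => pvUpperCase.toList.contains c),
       s || xs.any (fun c => pvSpecialCharacters.toList.contains c)) := by
  induction xs generalizing d l u s with
  | nil => simp
  | cons c cs ih =>
      simp only [List.foldl_cons, List.any_cons, pvStep]
      rw [ih]
      simp only [Prod.mk.injEq]
      refine ⟨?_, ?_, ?_, ?_⟩ <;>
        cases List.contains _ c <;> simp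

-- the two traversal orders find a common element in the same cases
theorem pvAny_swap (as bs : List Char) :
    as.any (fun a => bs.contains a) = bs.any (fun b => as.contains b) := by
  rw [Bool.eq_iff_iff]
  simp only [List.any_eq_true, List.contains_iff_mem]
  constructor
  · rintro ⟨a, ha, hb⟩; exact ⟨a, by simpa using hb, by simpa using ha⟩
  · rintro ⟨b, hb, ha⟩; exact ⟨b, by simpa using ha, by simpa using hb⟩

-- ===== VERDICT (by name: the statement is the Claim_ definition above) =====
theorem minimumNumber_spec : Claim_equal_minimumNumber := by
  intro n password _
  show minimumNumber n password = minimumNumber_alt n password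
  unfold minimumNumber minimumNumber_alt pvAnyIn
  rw [pvFoldl_step]
  rw [pvAny_swap pvNumbers.toList, pvAny_swap pvLowerCase.toList,
      pvAny_swap pvUpperCase.toList, pvAny_swap pvSpecialCharacters.toList]
  cases hd : password.toList.any (fun b => pvNumbers.toList.contains b) <;>
    cases hl : password.toList.any (fun b => pvLowerCase.toList.contains b) <;>
      cases hu : password.toList.any (fun b => pvUpperCase.toList.contains b) <;>
        cases hs : password.toList.any (fun b => pvSpecialCharacters.toList.contains b) <;>
          simp <;> omega
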